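-- pv_equiv track=rewrite | github.com/Adam-Jimenez/binarysearch-editorials | Low Score.py | solve
-- ===== SOURCE A (Python) =====
-- from collections import defaultdict,deque
-- from heapq import heappush, heappop
--
-- def solve(edges):
--     adj = defaultdict(list)
--     nodes=set()
--     for u,v,w in edges:
--         adj[u].append((v,w))
--         adj[v].append((u,w))
--         nodes.add(u)
--         nodes.add(v)
--     hp=[(0,0,0,0)]
--     target = max(nodes)
--     seen=set()
--     while hp:
--         key,edgecount,maxweight,cur = heappop(hp)
--         if cur == target:
--             return key
--         if cur in seen:
--             continue
--         seen.add(cur)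
--         for nei,wei in adj[cur]:
--             next_edgecount = edgecount+1
--             next_maxweight = max(maxweight, wei)
--             next_key = next_edgecount*next_maxweight
--             heappush(hp, (next_key, next_edgecount,next_maxweight, nei))
--     return -1
-- ===== SOURCE B (Python) =====
-- from collections import defaultdict
--
-- def solve(edges):
--     # Same best-first search as A, but the frontier is a plain list scanned with
--     # min() instead of a lazy-deletion binary heap, and the target is computed
--     # directly from the edge endpoints without building a node set.
--     target = max(max(u, v) for u, v, w in edges)
--     adj = defaultdict(list)
--     for u, v, w in edges:
--         adj[u].append((v, w))
--         adj[v].append((u, w))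
--     frontier = [(0, 0, 0, 0)]
--     done = set()
--     while frontier:
--         state = min(frontier)
--         frontier.remove(state)
--         key, edgecount, maxweight, cur = state
--         if cur == target:
--             return key
--         if cur in done:
--             continue
--         done.add(cur)
--         for nei, wei in adj[cur]:
--             ec = edgecount + 1
--             mw = max(maxweight, wei)
--             frontier.append((ec * mw, ec, mw, nei))
--     return -1
-- ===== Notes on version B (the rewrite author's own statement) =====
-- stated objective: simpler
-- what changed: A's lazy-deletion binary heap (heapq) plus an explicit node set are replaced by a plain frontier list scanned with min() and removed from by value, with the target computed directly as the max over edge endpoints; the best-first search returns the identical value.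
import Mathlib
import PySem

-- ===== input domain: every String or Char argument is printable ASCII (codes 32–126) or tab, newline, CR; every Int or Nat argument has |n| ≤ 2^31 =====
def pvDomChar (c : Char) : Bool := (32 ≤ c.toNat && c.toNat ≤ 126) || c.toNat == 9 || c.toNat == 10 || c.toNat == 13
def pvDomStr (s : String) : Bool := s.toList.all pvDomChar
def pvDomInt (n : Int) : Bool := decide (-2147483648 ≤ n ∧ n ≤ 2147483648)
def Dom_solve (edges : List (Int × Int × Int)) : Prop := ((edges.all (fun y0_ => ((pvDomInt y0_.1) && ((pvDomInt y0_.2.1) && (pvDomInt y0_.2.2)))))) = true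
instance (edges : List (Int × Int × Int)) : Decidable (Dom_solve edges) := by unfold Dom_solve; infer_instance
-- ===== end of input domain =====

-- B replaces A's lazy-deletion binary heap by a plain frontier list scanned with min()
-- (objective: simpler — no heapq, no node set); return values agree everywhere A returns.

-- ===== PORT A =====

-- Python's comparison of the 4-tuples (key, edgecount, maxweight, cur): lexicographic.
def stLt (a b : Int × Int × Int × Int) : Bool :=
  decide (a.1 < b.1 ∨ (a.1 = b.1 ∧ (a.2.1 < b.2.1 ∨ (a.2.1 = b.2.1 ∧
    (a.2.2.1 < b.2.2.1 ∨ (a.2.2.1 = b.2.2.1 ∧ a.2.2.2 < b.2.2.2))))))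

-- heapq is used only through heappush/heappop, so the heap is modelled observationally
-- (exact for this use): the list is kept sorted by Python's tuple order, heappush is a
-- sorted insertion and heappop takes the head — heappop returns the least element, and
-- equal tuples are indistinguishable, so every popped VALUE is the one CPython pops.
def heappushA : List (Int × Int × Int × Int) → (Int × Int × Int × Int) → List (Int × Int × Int × Int)
  | [], x => [x]
  | y :: ys, x => if stLt x y then x :: y :: ys else y :: heappushA ys x

-- the single 'for u,v,w in edges' loop of A: builds adj (defaultdict(list)) and nodes (set)
def buildA (edges : List (Int × Int × Int)) : PySem.Dict Int (List (Int × Int)) × PySem.Set Int :=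
  edges.foldl (fun st e =>
      (((st.1.modify e.1 [] (· ++ [(e.2.1, e.2.2)])).modify e.2.1 [] (· ++ [(e.1, e.2.2)])),
       ((st.2.add e.1).add e.2.1)))
    (PySem.Dict.empty, ([] : PySem.Set Int))

-- the 'while hp:' loop; fuel 2*|edges|+2 bounds the pops (1 + Σ degrees ≤ 1 + 2*|edges|)
def solveLoopA (adj : PySem.Dict Int (List (Int × Int))) (target : Int) :
    Nat → List (Int × Int × Int × Int) → PySem.Set Int → Int
  | 0, _, _ => -1
  | _ + 1, [], _ => -1
  | fuel + 1, s :: hp, seen =>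
    if s.2.2.2 == target then s.1
    else if seen.contains s.2.2.2 then solveLoopA adj target fuel hp seen
    else
      solveLoopA adj target fuel
        ((adj.getD s.2.2.2 []).foldl (fun h p =>
            heappushA h ((s.2.1 + 1) * max s.2.2.1 p.2, s.2.1 + 1, max s.2.2.1 p.2, p.1)) hp)
        (seen.add s.2.2.2)

def solve (edges : List (Int × Int × Int)) : Int :=
  match PySem.List.max? (buildA edges).2 id with   -- max(nodes); none = ValueError, excluded by Pre_
  | none => -1
  | some target =>
    solveLoopA (buildA edges).1 target (2 * edges.length + 2) [(0, 0, 0, 0)] ([] : PySem.Set Int)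

-- ===== PORT B =====

-- target = max(max(u, v) for u, v, w in edges)  (Python max of a generator: fold from the first element)
def targetB (edges : List (Int × Int × Int)) : Int :=
  match edges with
  | [] => -1        -- unreachable: Python raises ValueError on empty edges, excluded by Pre_
  | e :: rest => rest.foldl (fun m e => max m (max e.1 e.2.1)) (max e.1 e.2.1)

def buildB (edges : List (Int × Int × Int)) : PySem.Dict Int (List (Int × Int)) :=
  edges.foldl (fun d e =>
      (d.modify e.1 [] (· ++ [(e.2.1, e.2.2)])).modify e.2.1 [] (· ++ [(e.1, e.2.2)]))
    PySem.Dict.empty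

-- min(frontier): Python keeps the first minimal element; equal tuples are equal values
def scanMinB : (Int × Int × Int × Int) → List (Int × Int × Int × Int) → (Int × Int × Int × Int)
  | m, [] => m
  | m, x :: xs => scanMinB (if stLt x m then x else m) xs

def solveLoopB (adj : PySem.Dict Int (List (Int × Int))) (target : Int) :
    Nat → List (Int × Int × Int × Int) → PySem.Set Int → Int
  | 0, _, _ => -1
  | _ + 1, [], _ => -1
  | fuel + 1, f :: fs, done =>
    let s := scanMinB f fs
    -- frontier.remove(state): state ∈ frontier, so Python's remove never raises here
    let frontier' := (PySem.List.remove? (f :: fs) s).getD []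
    if s.2.2.2 == target then s.1
    else if done.contains s.2.2.2 then solveLoopB adj target fuel frontier' done
    else
      solveLoopB adj target fuel
        ((adj.getD s.2.2.2 []).foldl (fun l p =>
            l ++ [((s.2.1 + 1) * max s.2.2.1 p.2, s.2.1 + 1, max s.2.2.1 p.2, p.1)]) frontier')
        (done.add s.2.2.2)

def solve_alt (edges : List (Int × Int × Int)) : Int :=
  solveLoopB (buildB edges) (targetB edges) (2 * edges.length + 2) [(0, 0, 0, 0)] ([] : PySem.Set Int)

-- ===== PRECONDITION & SPEC =====
-- Pre_ excludes only edges = [], on which Python A (max of an empty set) raises ValueError.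
def Pre_solve (edges : List (Int × Int × Int)) : Prop := edges ≠ []
instance (edges : List (Int × Int × Int)) : Decidable (Pre_solve edges) := by unfold Pre_solve; infer_instance
def pvWitness_solve : (List (Int × Int × Int)) := [(0, 1, 2)]

def Spec_solve (edges : List (Int × Int × Int)) (out : Int) : Prop := out = solve_alt edges
instance (edges : List (Int × Int × Int)) (out : Int) : Decidable (Spec_solve edges out) := by unfold Spec_solve; infer_instance

-- ===== CLAIM (what is proved, stated in full; the proofs are below) =====
def Claim_equal_solve : Prop := ∀ (edges : List (Int × Int × Int)), Dom_solve edges → Pre_solve edges → Spec_solve edges (solve edges)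

-- ===== LEMMAS AND PROOFS =====

theorem stLt_irrefl (a : Int × Int × Int × Int) : stLt a a = false := by
  simp [stLt]

theorem stLt_trans {a b c : Int × Int × Int × Int} (h1 : stLt a b = true) (h2 : stLt b c = true) :
    stLt a c = true := by
  obtain ⟨a1, a2, a3, a4⟩ := a; obtain ⟨b1, b2, b3, b4⟩ := b; obtain ⟨c1, c2, c3, c4⟩ := c
  simp only [stLt, decide_eq_true_eq] at *
  omega

theorem stLt_asymm {a b : Int × Int × Int × Int} (h : stLt a b = true) : stLt b a = false := by
  obtain ⟨a1, a2, a3, a4⟩ := a; obtain ⟨b1, b2, b3, b4⟩ := b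
  simp only [stLt, decide_eq_true_eq, decide_eq_false_iff_not] at *
  omega

theorem stLt_total {a b : Int × Int × Int × Int} (h1 : stLt a b = false) (h2 : stLt b a = false) :
    a = b := by
  obtain ⟨a1, a2, a3, a4⟩ := a; obtain ⟨b1, b2, b3, b4⟩ := b
  simp only [stLt, decide_eq_false_iff_not, Prod.mk.injEq] at *
  omega

theorem stLt_connex {a b : Int × Int × Int × Int} (h : stLt a b = false) :
    a = b ∨ stLt b a = true := by
  obtain ⟨a1, a2, a3, a4⟩ := a; obtain ⟨b1, b2, b3, b4⟩ := b
  simp only [stLt, decide_eq_false_iff_not, decide_eq_true_eq, Prod.mk.injEq] at *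
  omega

theorem heappushA_perm (l : List (Int × Int × Int × Int)) (x : Int × Int × Int × Int) :
    (heappushA l x).Perm (x :: l) := by
  induction l with
  | nil => simp [heappushA]
  | cons y ys ih =>
    simp only [heappushA]
    split
    · exact List.Perm.refl _
    · exact ((ih.cons y).trans (List.Perm.swap x y ys))

theorem heappushA_pairwise {l : List (Int × Int × Int × Int)} (x : Int × Int × Int × Int)
    (h : l.Pairwise (fun a b => stLt b a = false)) :
    (heappushA l x).Pairwise (fun a b => stLt b a = false) := by
  induction l with
  | nil => simp [heappushA]
  | cons y ys ih =>
    rcases List.pairwise_cons.mp h with ⟨hy, hys⟩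
    simp only [heappushA]
    split
    · rename_i hxy
      refine List.pairwise_cons.mpr ⟨?_, h⟩
      intro z hz
      rcases List.mem_cons.mp hz with rfl | hz
      · exact stLt_asymm hxy
      · cases hzlt : stLt z x with
        | false => rfl
        | true => exact absurd (stLt_trans hzlt hxy) (by simp [hy z hz])
    · rename_i hxy
      refine List.pairwise_cons.mpr ⟨?_, ih hys⟩
      intro z hz
      rcases List.mem_cons.mp ((heappushA_perm ys x).mem_iff.mp hz) with rfl | hz'
      · simpa using hxy
      · exact hy z hz'

theorem scanMinB_spec (l : List (Int × Int × Int × Int)) (m : Int × Int × Int × Int) :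
    scanMinB m l ∈ m :: l ∧ ∀ x ∈ m :: l, stLt x (scanMinB m l) = false := by
  induction l generalizing m with
  | nil => simp [scanMinB, stLt_irrefl]
  | cons y ys ih =>
    by_cases hc : stLt y m = true
    · simp only [scanMinB, hc, if_pos]
      obtain ⟨ih1, ih2⟩ := ih y
      refine ⟨List.mem_cons_of_mem _ ih1, ?_⟩
      intro x hx
      rcases List.mem_cons.mp hx with rfl | hx
      · cases hmr : stLt x (scanMinB y ys) with
        | false => rfl
        | true => exact absurd (stLt_trans hc hmr) (by simp [ih2 y List.mem_cons_self])
      · exact ih2 x hx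
    · have hc' : stLt y m = false := by simpa using hc
      simp only [scanMinB, hc', if_neg, Bool.false_eq_true, not_false_iff]
      obtain ⟨ih1, ih2⟩ := ih m
      constructor
      · rcases List.mem_cons.mp ih1 with h | h
        · exact List.mem_cons.mpr (Or.inl h)
        · exact List.mem_cons_of_mem _ (List.mem_cons_of_mem _ h)
      · intro x hx
        rcases List.mem_cons.mp hx with rfl | hx
        · exact ih2 x List.mem_cons_self
        · rcases List.mem_cons.mp hx with rfl | hx
          · cases hyr : stLt x (scanMinB m ys) with
            | false => rfl
            | true =>
              rcases stLt_connex hc' with rfl | hmy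
              · exact absurd hyr (by simp [ih2 x List.mem_cons_self])
              · exact absurd (stLt_trans hmy hyr) (by simp [ih2 m List.mem_cons_self])
          · exact ih2 x (List.mem_cons_of_mem _ hx)

theorem remove?_of_mem {l : List (Int × Int × Int × Int)} {a : Int × Int × Int × Int}
    (h : a ∈ l) : PySem.List.remove? l a = some (l.erase a) := by
  rw [PySem.List.remove?, List.erase_eq_eraseIdx]
  cases h' : List.idxOf? a l with
  | none => exact absurd h (by simpa using List.idxOf?_eq_none_iff.mp h')
  | some i => simp

-- the popped value: the head of A's sorted heap is what B's min(frontier) returns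
theorem scanMin_eq_head {s : Int × Int × Int × Int} {t fs : List (Int × Int × Int × Int)}
    {f : Int × Int × Int × Int}
    (hs : (s :: t).Pairwise (fun a b => stLt b a = false))
    (hp : (f :: fs).Perm (s :: t)) : scanMinB f fs = s := by
  rcases scanMinB_spec fs f with ⟨h1, h2⟩
  have hmem : scanMinB f fs ∈ s :: t := hp.mem_iff.mp h1
  have hle : stLt (scanMinB f fs) s = false := by
    rcases List.mem_cons.mp hmem with rfl | hm
    · exact stLt_irrefl _
    · exact (List.pairwise_cons.mp hs).1 _ hm
  have hge : stLt s (scanMinB f fs) = false :=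
    h2 s (hp.mem_iff.mpr List.mem_cons_self)
  exact (stLt_total hge hle).symm

theorem foldl_heappush_perm (l : List (Int × Int)) (st : Int × Int → Int × Int × Int × Int)
    (t : List (Int × Int × Int × Int)) :
    (l.foldl (fun h p => heappushA h (st p)) t).Perm (t ++ l.map st) := by
  induction l generalizing t with
  | nil => simp
  | cons p ps ih =>
    simp only [List.foldl_cons, List.map_cons]
    exact (ih _).trans (((heappushA_perm t (st p)).append_right _).trans List.perm_middle.symm)

theorem foldl_heappush_pairwise (l : List (Int × Int)) (st : Int × Int → Int × Int × Int × Int)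
    {t : List (Int × Int × Int × Int)} (h : t.Pairwise (fun a b => stLt b a = false)) :
    (l.foldl (fun h p => heappushA h (st p)) t).Pairwise (fun a b => stLt b a = false) := by
  induction l generalizing t with
  | nil => simpa
  | cons p ps ih => exact ih (heappushA_pairwise _ h)

-- the lockstep invariant: A's sorted heap and B's frontier hold the same multiset of states
theorem loop_eq (adj : PySem.Dict Int (List (Int × Int))) (target : Int) :
    ∀ (fuel : Nat) (hp frontier : List (Int × Int × Int × Int)) (seen : PySem.Set Int),
      hp.Pairwise (fun a b => stLt b a = false) → frontier.Perm hp →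
      solveLoopA adj target fuel hp seen = solveLoopB adj target fuel frontier seen := by
  intro fuel
  induction fuel with
  | zero => intro hp frontier seen _ _; rfl
  | succ fuel ih =>
    intro hp frontier seen hsort hperm
    cases hp with
    | nil =>
      have : frontier = [] := List.Perm.eq_nil hperm
      subst this; rfl
    | cons s t =>
      cases frontier with
      | nil => exact absurd (List.Perm.eq_nil hperm.symm) (by simp)
      | cons f fs =>
        have hmin : scanMinB f fs = s := scanMin_eq_head hsort hperm
        have hsm : s ∈ f :: fs := hperm.mem_iff.mpr List.mem_cons_self
        have hrem : (PySem.List.remove? (f :: fs) s).getD [] = (f :: fs).erase s := by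
          rw [remove?_of_mem hsm]; rfl
        have herase : ((f :: fs).erase s).Perm t := by
          have := hperm.erase s
          rwa [List.erase_cons_head] at this
        simp only [solveLoopA, solveLoopB, hmin, hrem]
        split
        · rfl
        · split
          · exact ih t _ seen (List.Pairwise.of_cons hsort) herase
          · exact ih _ _ _
              (foldl_heappush_pairwise _ _ (List.Pairwise.of_cons hsort))
              (by
                rw [PySem.List.foldl_append_singleton_eq_map]
                exact (herase.append_right _).trans (foldl_heappush_perm _ _ t).symm)

-- the single edge loop of A splits into B's dict loop and the node-set loop
theorem buildA_eq (edges : List (Int × Int × Int)) :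
    buildA edges = (buildB edges, edges.foldl (fun (s : PySem.Set Int) e => (s.add e.1).add e.2.1) ([] : PySem.Set Int)) := by
  exact PySem.List.foldl_prod_mk
    (fun (d : PySem.Dict Int (List (Int × Int))) (e : Int × Int × Int) =>
      (d.modify e.1 [] (· ++ [(e.2.1, e.2.2)])).modify e.2.1 [] (· ++ [(e.1, e.2.2)]))
    (fun (s : PySem.Set Int) (e : Int × Int × Int) => (s.add e.1).add e.2.1) edges
    PySem.Dict.empty ([] : PySem.Set Int)

-- nodes built by A's loop: membership characterisation
theorem mem_foldl_add (l : List (Int × Int × Int)) (s : PySem.Set Int) (x : Int) :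
    x ∈ l.foldl (fun (s : PySem.Set Int) e => (s.add e.1).add e.2.1) s ↔
      x ∈ s ∨ ∃ e ∈ l, x = e.1 ∨ x = e.2.1 := by
  induction l generalizing s with
  | nil => simp
  | cons e l ih =>
    simp only [List.foldl_cons, ih, PySem.Set.mem_add, List.mem_cons]
    constructor
    · rintro (((h | rfl) | rfl) | ⟨e', he', h⟩)
      · exact Or.inl h
      · exact Or.inr ⟨e, Or.inl rfl, Or.inl rfl⟩
      · exact Or.inr ⟨e, Or.inl rfl, Or.inr rfl⟩
      · exact Or.inr ⟨e', Or.inr he', h⟩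
    · rintro (h | ⟨e', (rfl | he'), h⟩)
      · exact Or.inl (Or.inl (Or.inl h))
      · rcases h with rfl | rfl
        · exact Or.inl (Or.inl (Or.inr rfl))
        · exact Or.inl (Or.inr rfl)
      · exact Or.inr ⟨e', he', h⟩

-- B's fold over max: the result is an endpoint and bounds every endpoint and the seed
theorem foldl_max_spec (l : List (Int × Int × Int)) (a : Int) :
    (l.foldl (fun m e => max m (max e.1 e.2.1)) a = a ∨
      ∃ e ∈ l, l.foldl (fun m e => max m (max e.1 e.2.1)) a = e.1 ∨
               l.foldl (fun m e => max m (max e.1 e.2.1)) a = e.2.1) ∧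
    a ≤ l.foldl (fun m e => max m (max e.1 e.2.1)) a ∧
    ∀ e ∈ l, e.1 ≤ l.foldl (fun m e => max m (max e.1 e.2.1)) a ∧
             e.2.1 ≤ l.foldl (fun m e => max m (max e.1 e.2.1)) a := by
  induction l generalizing a with
  | nil => simp
  | cons e l ih =>
    obtain ⟨ihm, ihle, ihall⟩ := ih (max a (max e.1 e.2.1))
    simp only [List.foldl_cons, List.mem_cons]
    refine ⟨?_, le_trans (le_max_left _ _) ihle, ?_⟩
    · rcases ihm with h | ⟨e', he', h⟩
      · rcases max_choice a (max e.1 e.2.1) with h2 | h2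
        · exact Or.inl (h.trans h2)
        · rcases max_choice e.1 e.2.1 with h3 | h3
          · exact Or.inr ⟨e, Or.inl rfl, Or.inl (h.trans (h2.trans h3))⟩
          · exact Or.inr ⟨e, Or.inl rfl, Or.inr (h.trans (h2.trans h3))⟩
      · exact Or.inr ⟨e', Or.inr he', h⟩
    · intro e' he'
      rcases he' with rfl | he'
      · constructor
        · exact le_trans (le_trans (le_max_left _ _) (le_max_right _ _)) ihle
        · exact le_trans (le_trans (le_max_right _ _) (le_max_right _ _)) ihle
      · exact ihall e' he'

-- targets coincide on nonempty edges
theorem target_eq {edges : List (Int × Int × Int)} (h : edges ≠ []) :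
    PySem.List.max? (buildA edges).2 id = some (targetB edges) := by
  cases edges with
  | nil => exact absurd rfl h
  | cons e rest =>
    cases hm : PySem.List.max? (buildA (e :: rest)).2 id with
    | none =>
      have := (PySem.List.max?_eq_none_iff _ _).mp hm
      have he : e.1 ∈ (buildA (e :: rest)).2 := by
        rw [buildA_eq]
        exact (mem_foldl_add _ _ _).mpr (Or.inr ⟨e, List.mem_cons_self, Or.inl rfl⟩)
      rw [this] at he
      exact absurd he (List.not_mem_nil)
    | some m =>
      have hmem : m ∈ (buildA (e :: rest)).2 := PySem.List.max?_mem hm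
      have hmax : ∀ y ∈ (buildA (e :: rest)).2, y ≤ m := by
        intro y hy; exact PySem.List.max?_isMax hm y hy
      obtain ⟨htm, htle, htall⟩ := foldl_max_spec rest (max e.1 e.2.1)
      have htgt : targetB (e :: rest) = rest.foldl (fun m e => max m (max e.1 e.2.1)) (max e.1 e.2.1) := rfl
      -- m ≤ targetB : m is an endpoint
      have hmend : ∃ e' ∈ e :: rest, m = e'.1 ∨ m = e'.2.1 := by
        rw [buildA_eq] at hmem
        rcases (mem_foldl_add _ _ _).mp hmem with h' | h'
        · exact absurd h' (List.not_mem_nil)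
        · exact h'
      have h1 : m ≤ targetB (e :: rest) := by
        rcases hmend with ⟨e', he', hme⟩
        rw [htgt]
        rcases List.mem_cons.mp he' with rfl | he'
        · rcases hme with rfl | rfl
          · exact le_trans (le_max_left _ _) htle
          · exact le_trans (le_max_right _ _) htle
        · rcases hme with rfl | rfl
          · exact (htall e' he').1
          · exact (htall e' he').2
      have h2 : targetB (e :: rest) ≤ m := by
        apply hmax
        rw [buildA_eq]
        apply (mem_foldl_add _ _ _).mpr
        apply Or.inr
        rw [htgt]
        rcases htm with h' | ⟨e', he', h'⟩
        · rcases max_choice e.1 e.2.1 with h2 | h2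
          · exact ⟨e, List.mem_cons_self, Or.inl (h'.trans h2)⟩
          · exact ⟨e, List.mem_cons_self, Or.inr (h'.trans h2)⟩
        · exact ⟨e', List.mem_cons_of_mem _ he', h'⟩
      rw [le_antisymm h1 h2]

-- ===== VERDICT (by name: the statement is the Claim_ definition above) =====
theorem solve_spec : Claim_equal_solve := by
  intro edges _ hpre
  unfold Spec_solve solve solve_alt
  rw [target_eq hpre, buildA_eq]
  exact loop_eq _ _ _ _ _ _ (by simp) (List.Perm.refl _)
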